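-- pv_equiv track=rewrite | github.com/patpij2/Logia-Competition-All-Solutions | logia 9/3/autobusy.py | nrj
-- ===== SOURCE A (Python) =====
-- def nrj(tab):
--     tab1 = []
--     tab2 = []
--     wyniki = []
--
--     for i in tab:
--         napis = str(i[1])
--         minuty = int(napis[-2:])
--
--         if len(napis) == 3:
--             godzina = int(napis[0])
--         else:
--             godzina = int(napis[0:2])
--
--         czas = godzina*60 + minuty
--
--         if i[0] == 1:
--             tab1.append(czas)
--         else:
--             tab2.append(czas)
--
--     new_tab1 = []
--     new_tab2 = []
--     for i in range(len(tab1)-1):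
--         new_tab1.append((tab1[i]+tab1[i+1])//2)
--     for i in range(len(tab2)-1):
--         new_tab2.append((tab2[i]+tab2[i+1])//2)
--
--     tab1.extend(new_tab1)
--     tab2.extend(new_tab2)
--
--     for i in range(1440):
--         if i in tab1 and i in tab2:
--             wyniki.append([2, i-1])
--             wyniki.append([1, i])
--         elif i in tab1:
--             wyniki.append([1, i])
--         elif i in tab2:
--             wyniki.append([2, i])
--
--     for i in range(len(wyniki)):
--         godz = wyniki[i][1]//60
--         minuty = wyniki[i][1]%60
--
--         wyniki[i][1] = godz*100+minuty
--
--     return wyniki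
-- ===== SOURCE B (Python) =====
-- def _czas(t):
--     s = str(t)
--     h = int(s[0]) if len(s) == 3 else int(s[:2])
--     return h * 60 + int(s[-2:])
--
--
-- def nrj(tab):
--     t1 = [_czas(r[1]) for r in tab if r[0] == 1]
--     t2 = [_czas(r[1]) for r in tab if r[0] != 1]
--     t1 += [(x + y) // 2 for x, y in zip(t1, t1[1:])]
--     t2 += [(x + y) // 2 for x, y in zip(t2, t2[1:])]
--     fmt = lambda t: t // 60 * 100 + t % 60
--     a = sorted({x for x in t1 if 0 <= x < 1440})
--     b = sorted({x for x in t2 if 0 <= x < 1440})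
--     out, i, j = [], 0, 0
--     while i < len(a) and j < len(b):
--         if a[i] == b[j]:
--             out.append([2, fmt(a[i] - 1)])
--             out.append([1, fmt(a[i])])
--             i += 1
--             j += 1
--         elif a[i] < b[j]:
--             out.append([1, fmt(a[i])])
--             i += 1
--         else:
--             out.append([2, fmt(b[j])])
--             j += 1
--     out += [[1, fmt(x)] for x in a[i:]]
--     out += [[2, fmt(x)] for x in b[j:]]
--     return out
-- ===== Notes on version B (the rewrite author's own statement) =====
-- stated objective: alternative
-- what changed: B replaces A's scan of all 1440 minutes with O(n) list-membership tests per minute: it sorts the two deduplicated in-range minute lists and emits the timetable by a classic two-pointer merge of the two sorted lists (no membership tests at all), fusing the HHMM reformatting into emission.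
import Mathlib
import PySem

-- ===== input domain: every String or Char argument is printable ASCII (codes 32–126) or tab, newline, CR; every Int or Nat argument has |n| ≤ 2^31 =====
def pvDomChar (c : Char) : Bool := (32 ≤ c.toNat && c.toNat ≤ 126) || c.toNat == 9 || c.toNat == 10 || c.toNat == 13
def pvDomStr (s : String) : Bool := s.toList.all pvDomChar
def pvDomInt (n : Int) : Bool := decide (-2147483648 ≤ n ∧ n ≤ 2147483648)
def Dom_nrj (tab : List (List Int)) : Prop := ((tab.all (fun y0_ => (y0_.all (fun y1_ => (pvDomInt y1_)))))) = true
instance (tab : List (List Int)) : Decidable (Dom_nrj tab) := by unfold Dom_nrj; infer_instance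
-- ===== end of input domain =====

-- B replaces A's 1440-minute scan with list-membership tests by a two-pointer merge of the two
-- sorted deduplicated in-range minute lists, fusing the HHMM reformatting into emission.


-- ===== PORT A =====
-- czas of one timetable entry; shared by both ports because Source B's helper _czas is the
-- same code A has inline.  int(...) is PySem.Int.ofChars?; the .getD 0 is never reached
-- under Pre_ (where int() would raise, A's input is excluded).
def czasOf (t : Int) : Int :=
  let napis := PySem.Int.toChars t
  let minuty := (PySem.Int.ofChars? (PySem.List.slice napis (some (-2)) none)).getD 0
  let godzina :=
    if napis.length = 3 then (PySem.Int.ofChars? [napis.getD 0 ' ']).getD 0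
    else (PySem.Int.ofChars? (PySem.List.slice napis (some 0) (some 2))).getD 0
  godzina * 60 + minuty

def fmtHHMM (t : Int) : Int := PySem.Int.floordiv t 60 * 100 + PySem.Int.mod t 60

def nrj (tab : List (List Int)) : List (List Int) :=
  let p := tab.foldl (fun (acc : List Int × List Int) i =>
      let czas := czasOf (i.getD 1 0)
      if i.getD 0 0 = 1 then (acc.1 ++ [czas], acc.2) else (acc.1, acc.2 ++ [czas]))
    ([], [])
  let tab1 := p.1
  let tab2 := p.2
  let new_tab1 := (PySem.List.pyRange 0 ((tab1.length : Int) - 1) 1).foldl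
      (fun acc i => acc ++ [PySem.Int.floordiv (PySem.List.pyGetD tab1 i 0 + PySem.List.pyGetD tab1 (i + 1) 0) 2]) []
  let new_tab2 := (PySem.List.pyRange 0 ((tab2.length : Int) - 1) 1).foldl
      (fun acc i => acc ++ [PySem.Int.floordiv (PySem.List.pyGetD tab2 i 0 + PySem.List.pyGetD tab2 (i + 1) 0) 2]) []
  let tab1 := tab1 ++ new_tab1
  let tab2 := tab2 ++ new_tab2
  let wyniki := (PySem.List.pyRange 0 1440 1).foldl (fun acc i =>
      if tab1.contains i && tab2.contains i then acc ++ [[2, i - 1], [1, i]]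
      else if tab1.contains i then acc ++ [[1, i]]
      else if tab2.contains i then acc ++ [[2, i]]
      else acc) []
  -- the final for-loop sets wyniki[i][1] := godz*100+minuty for every i
  wyniki.map (fun w => w.set 1 (fmtHHMM (w.getD 1 0)))

-- ===== PORT B =====
-- Source B's while-loop over two indices into the sorted lists a,b is the obvious
-- structural recursion on the two lists; the trailing 'out += ...' tail copies are
-- the base cases.
def mergeOut : List Int → List Int → List (List Int)
  | [], b => b.map (fun y => [2, fmtHHMM y])
  | x :: a, [] => (x :: a).map (fun x => [1, fmtHHMM x])
  | x :: a, y :: b =>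
    if x = y then [2, fmtHHMM (x - 1)] :: [1, fmtHHMM x] :: mergeOut a b
    else if x < y then [1, fmtHHMM x] :: mergeOut a (y :: b)
    else [2, fmtHHMM y] :: mergeOut (x :: a) b

def nrj_alt (tab : List (List Int)) : List (List Int) :=
  let t1 := (tab.filter (fun r => r.getD 0 0 == 1)).map (fun r => czasOf (r.getD 1 0))
  let t2 := (tab.filter (fun r => !(r.getD 0 0 == 1))).map (fun r => czasOf (r.getD 1 0))
  let t1 := t1 ++ (t1.zip t1.tail).map (fun q => PySem.Int.floordiv (q.1 + q.2) 2)
  let t2 := t2 ++ (t2.zip t2.tail).map (fun q => PySem.Int.floordiv (q.1 + q.2) 2)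
  let a := PySem.List.sorted ((PySem.Set.ofList (t1.filter (fun x => decide (0 ≤ x) && decide (x < 1440)))) : List Int) (fun x => x) false
  let b := PySem.List.sorted ((PySem.Set.ofList (t2.filter (fun x => decide (0 ≤ x) && decide (x < 1440)))) : List Int) (fun x => x) false
  mergeOut a b

-- ===== PRECONDITION & SPEC =====
-- Pre_ excludes exactly the inputs where the Python A raises: a row shorter than 2
-- (IndexError on i[1]) and a time value in [-99,-10] (str(t) is '-dd', so int(napis[0])
-- = int('-') raises ValueError).  A returns on every other input.
def Pre_nrj (tab : List (List Int)) : Prop :=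
  (tab.all (fun r => decide (2 ≤ r.length) &&
    !(decide (-99 ≤ r.getD 1 0) && decide (r.getD 1 0 ≤ -10)))) = true
instance (tab : List (List Int)) : Decidable (Pre_nrj tab) := by unfold Pre_nrj; infer_instance
def pvWitness_nrj : List (List Int) := [[1, 630], [2, 630], [1, 700], [2, 45]]
def Spec_nrj (tab : List (List Int)) (out : List (List Int)) : Prop := out = nrj_alt tab
instance (tab : List (List Int)) (out : List (List Int)) : Decidable (Spec_nrj tab out) := by unfold Spec_nrj; infer_instance

-- ===== CLAIM (what is proved, stated in full; the proofs are below) =====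
def Claim_equal_nrj : Prop := ∀ (tab : List (List Int)), Dom_nrj tab → Pre_nrj tab → Spec_nrj tab (nrj tab)

-- ===== LEMMAS AND PROOFS =====

-- proof-only helpers naming the phases
def parse1 (tab : List (List Int)) : List Int :=
  (tab.filter (fun r => r.getD 0 0 == 1)).map (fun r => czasOf (r.getD 1 0))
def parse2 (tab : List (List Int)) : List Int :=
  (tab.filter (fun r => !(r.getD 0 0 == 1))).map (fun r => czasOf (r.getD 1 0))
def aug (l : List Int) : List Int :=
  l ++ (l.zip l.tail).map (fun q => PySem.Int.floordiv (q.1 + q.2) 2)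
def fmtRow (w : List Int) : List Int := w.set 1 (fmtHHMM (w.getD 1 0))
def emitA (t1 t2 : List Int) (i : Int) : List (List Int) :=
  if t1.contains i && t2.contains i then [[2, i - 1], [1, i]]
  else if t1.contains i then [[1, i]]
  else if t2.contains i then [[2, i]]
  else []
-- what mergeOut emits at one minute, phrased by membership in the two sorted lists
def hEmit (a b : List Int) (i : Int) : List (List Int) :=
  if a.contains i && b.contains i then [[2, fmtHHMM (i - 1)], [1, fmtHHMM i]]
  else if a.contains i then [[1, fmtHHMM i]]
  else [[2, fmtHHMM i]]
-- the sorted union of the two sorted lists (the minutes mergeOut visits, in order)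
def sunion : List Int → List Int → List Int
  | [], b => b
  | x :: a, [] => x :: a
  | x :: a, y :: b =>
    if x = y then x :: sunion a b
    else if x < y then x :: sunion a (y :: b)
    else y :: sunion (x :: a) b

theorem mem_sunion (a b : List Int) (i : Int) : i ∈ sunion a b ↔ i ∈ a ∨ i ∈ b := by
  induction a, b using sunion.induct with
  | case1 b => simp [sunion]
  | case2 x a => simp [sunion]
  | case3 a y b ih =>
    simp only [sunion, if_true, List.mem_cons, ih]
    tauto
  | case4 x a y b hxy hlt ih =>
    simp only [sunion, if_neg hxy, if_pos hlt, List.mem_cons, ih]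
    tauto
  | case5 x a y b hxy hlt ih =>
    simp only [sunion, if_neg hxy, if_neg hlt, List.mem_cons, ih]
    tauto

theorem sunion_pairwise (a b : List Int) (ha : a.Pairwise (· < ·)) (hb : b.Pairwise (· < ·)) :
    (sunion a b).Pairwise (· < ·) := by
  induction a, b using sunion.induct with
  | case1 b => simpa [sunion] using hb
  | case2 x a => simpa [sunion] using ha
  | case3 a y b ih =>
    rw [List.pairwise_cons] at ha hb
    simp only [sunion, if_true, List.pairwise_cons]
    refine ⟨fun i hi => ?_, ih ha.2 hb.2⟩
    rcases (mem_sunion a b i).1 hi with h | h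
    · exact ha.1 i h
    · exact hb.1 i h
  | case4 x a y b hxy hlt ih =>
    rw [List.pairwise_cons] at ha
    simp only [sunion, if_neg hxy, if_pos hlt, List.pairwise_cons]
    refine ⟨fun i hi => ?_, ih ha.2 hb⟩
    rcases (mem_sunion a (y :: b) i).1 hi with h | h
    · exact ha.1 i h
    · rcases List.mem_cons.1 h with h | h
      · exact h ▸ hlt
      · rw [List.pairwise_cons] at hb
        exact lt_trans hlt (hb.1 i h)
  | case5 x a y b hxy hlt ih =>
    rw [List.pairwise_cons] at hb
    have hyx : y < x := by omega
    simp only [sunion, if_neg hxy, if_neg hlt, List.pairwise_cons]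
    refine ⟨fun i hi => ?_, ih ha hb.2⟩
    rcases (mem_sunion (x :: a) b i).1 hi with h | h
    · rcases List.mem_cons.1 h with h | h
      · exact h ▸ hyx
      · rw [List.pairwise_cons] at ha
        exact lt_trans hyx (ha.1 i h)
    · exact hb.1 i h

-- flatMap of a singleton-producing function is a map
theorem flatMap_single {α β : Type} (l : List α) (f : α → β) :
    l.flatMap (fun x => [f x]) = l.map f := by
  induction l with
  | nil => rfl
  | cons x t ih => simp [ih]

-- on strictly sorted lists the merge is the flatMap of the membership emitter
theorem mergeOut_eq_flatMap (a b : List Int) (ha : a.Pairwise (· < ·)) (hb : b.Pairwise (· < ·)) :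
    mergeOut a b = (sunion a b).flatMap (hEmit a b) := by
  induction a, b using sunion.induct with
  | case1 b =>
    simp only [sunion, mergeOut]
    rw [List.flatMap_congr (g := fun i => [([2, fmtHHMM i] : List Int)])
      (by intro i hi; simp [hEmit])]
    rw [flatMap_single]
  | case2 x a =>
    simp only [sunion, mergeOut]
    rw [List.flatMap_congr (g := fun i => [([1, fmtHHMM i] : List Int)])
      (by
        intro i hi
        have h1 : i ∈ x :: a := hi
        simp [hEmit, h1])]
    rw [flatMap_single]
  | case3 a y b ih =>
    rw [List.pairwise_cons] at ha hb
    simp only [mergeOut, if_true, sunion, List.flatMap_cons]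
    have hcong : ∀ i ∈ sunion a b, hEmit (y :: a) (y :: b) i = hEmit a b i := by
      intro i hi
      rcases (mem_sunion a b i).1 hi with h | h
      · have hne : i ≠ y := by have := ha.1 i h; omega
        simp [hEmit, hne]
      · have hne : i ≠ y := by have := hb.1 i h; omega
        simp [hEmit, hne]
    rw [List.flatMap_congr hcong, ← ih ha.2 hb.2]
    simp [hEmit]
  | case4 x a y b hxy hlt ih =>
    rw [List.pairwise_cons] at ha
    have hbc := List.pairwise_cons.1 hb
    simp only [mergeOut, if_neg hxy, if_pos hlt, sunion, List.flatMap_cons]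
    have hcong : ∀ i ∈ sunion a (y :: b), hEmit (x :: a) (y :: b) i = hEmit a (y :: b) i := by
      intro i hi
      have hne : i ≠ x := by
        rcases (mem_sunion a (y :: b) i).1 hi with h | h
        · have := ha.1 i h; omega
        · rcases List.mem_cons.1 h with h | h
          · omega
          · have := hbc.1 i h; omega
      simp [hEmit, hne]
    rw [List.flatMap_congr hcong, ← ih ha.2 hb]
    have hxb : x ∉ y :: b := by
      simp only [List.mem_cons]
      rintro (h | h)
      · omega
      · have := hbc.1 x h; omega
    simp [hEmit, hxb]
  | case5 x a y b hxy hlt ih =>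
    rw [List.pairwise_cons] at hb
    have hac := List.pairwise_cons.1 ha
    have hyx : y < x := by omega
    simp only [mergeOut, if_neg hxy, if_neg hlt, sunion, List.flatMap_cons]
    have hcong : ∀ i ∈ sunion (x :: a) b, hEmit (x :: a) (y :: b) i = hEmit (x :: a) b i := by
      intro i hi
      have hne : i ≠ y := by
        rcases (mem_sunion (x :: a) b i).1 hi with h | h
        · rcases List.mem_cons.1 h with h | h
          · omega
          · have := hac.1 i h; omega
        · have := hb.1 i h; omega
      simp [hEmit, hne]
    rw [List.flatMap_congr hcong, ← ih ha hb.2]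
    have hya : y ∉ x :: a := by
      simp only [List.mem_cons]
      rintro (h | h)
      · omega
      · have := hac.1 y h; omega
    simp [hEmit, hya]

-- phase 1: A's two-accumulator fold is B's two filtered maps
theorem parse_foldl (tab : List (List Int)) (a b : List Int) :
    tab.foldl (fun (acc : List Int × List Int) i =>
        let czas := czasOf (i.getD 1 0)
        if i.getD 0 0 = 1 then (acc.1 ++ [czas], acc.2) else (acc.1, acc.2 ++ [czas]))
      (a, b)
    = (a ++ parse1 tab, b ++ parse2 tab) := by
  induction tab generalizing a b with
  | nil => simp [parse1, parse2]
  | cons r t ih =>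
    simp only [List.foldl_cons]
    by_cases h : r.getD 0 0 = 1
    · rw [if_pos h, ih]
      have h' : r[0]?.getD 0 = 1 := h
      simp [parse1, parse2, h']
    · rw [if_neg h, ih]
      have h' : ¬ r[0]?.getD 0 = 1 := h
      simp [parse1, parse2, h']

-- phase 2: A's index loop over range(len(l)-1) is B's zip-with-tail map
theorem midpoints (l : List Int) :
    (PySem.List.pyRange 0 ((l.length : Int) - 1) 1).foldl
      (fun acc i => acc ++ [PySem.Int.floordiv (PySem.List.pyGetD l i 0 + PySem.List.pyGetD l (i + 1) 0) 2]) []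
    = (l.zip l.tail).map (fun q => PySem.Int.floordiv (q.1 + q.2) 2) := by
  rw [PySem.List.foldl_append_singleton_eq_map, List.nil_append]
  have hL1 : (PySem.List.pyRange 0 ((l.length : Int) - 1) 1).length = l.length - 1 := by
    rw [PySem.List.length_pyRange_one]; omega
  have hL2 : (l.zip l.tail).length = l.length - 1 := by
    simp [List.length_zip, List.length_tail]
  apply List.ext_getElem
  · simp [hL1, hL2]
  · intro k h1 h2
    have hk : k < l.length - 1 := by
      have := h1; rw [List.length_map, hL1] at this; exact this
    have hk1 : k < l.length := by omega
    have hk2 : k + 1 < l.length := by omega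
    have hkr : k < (PySem.List.pyRange 0 ((l.length : Int) - 1) 1).length := by
      rw [hL1]; exact hk
    have hget : ∀ (m : Nat) (hm : m < l.length), PySem.List.pyGetD l (m : Int) 0 = l[m]'hm := by
      intro m hm
      rw [PySem.List.pyGetD_natCast]
      exact List.getD_eq_getElem l 0 hm
    have hr : (PySem.List.pyRange 0 ((l.length : Int) - 1) 1)[k]'hkr = (k : Int) := by
      have := PySem.List.getElem_pyRange_one (a := 0) (b := (l.length : Int) - 1) (k := k) hkr
      simp only [this, Int.zero_add]
    simp only [List.getElem_map, hr, List.getElem_zip]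
    have e2 : PySem.List.pyGetD l ((k : Int) + 1) 0 = l[k + 1]'hk2 := by
      have hc : ((k : Int) + 1) = ((k + 1 : Nat) : Int) := by push_cast; ring
      rw [hc, hget (k + 1) hk2]
    rw [hget k hk1, e2]
    congr 1
    simp [List.getElem_tail]

-- a flatMap may drop exactly the elements its function sends to []
theorem flatMap_eq_flatMap_filter {α β : Type} (l : List α) (p : α → Bool)
    (h : α → List β) (hnil : ∀ i, p i = false → h i = []) :
    l.flatMap h = (l.filter p).flatMap h := by
  induction l with
  | nil => simp
  | cons x t ih =>
    by_cases hx : p x = true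
    · simp [hx, ih]
    · have hx' : p x = false := by simpa using hx
      simp [hx', hnil x hx', ih]

-- the sorted deduplicated in-range list: strictly sorted, membership characterised
def sortedDedup (t : List Int) : List Int :=
  PySem.List.sorted ((PySem.Set.ofList (t.filter (fun x => decide (0 ≤ x) && decide (x < 1440)))) : List Int) (fun x => x) false

theorem sortedDedup_pairwise (t : List Int) : (sortedDedup t).Pairwise (· < ·) := by
  have hU : (PySem.Set.ofList (t.filter (fun x => decide (0 ≤ x) && decide (x < 1440))) : List Int).Nodup :=
    PySem.Set.nodup_ofList _
  have hs : (sortedDedup t).Perm _ := PySem.List.sorted_perm _ _ _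
  have hsn : (sortedDedup t).Nodup := hs.symm.nodup hU
  have hle : (sortedDedup t).Pairwise (· ≤ ·) := by
    simpa using PySem.List.sorted_pairwise
      (xs := (PySem.Set.ofList (t.filter (fun x => decide (0 ≤ x) && decide (x < 1440))) : List Int))
      (key := fun x : Int => x)
  exact (List.SortedLE.sortedLT_of_nodup (List.Pairwise.sortedLE hle) hsn).pairwise

theorem mem_sortedDedup (t : List Int) (i : Int) :
    i ∈ sortedDedup t ↔ i ∈ t ∧ (0 ≤ i ∧ i < 1440) := by
  unfold sortedDedup
  rw [PySem.List.mem_sorted, PySem.Set.mem_ofList, List.mem_filter]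
  simp

-- the minutes A's scan keeps = the minutes B's merge visits, in the same order
theorem scan_lists_eq (t1 t2 : List Int) :
    (PySem.List.pyRange 0 1440 1).filter (fun i => t1.contains i || t2.contains i)
    = sunion (sortedDedup t1) (sortedDedup t2) := by
  apply List.SortedLT.eq_of_mem_iff
  · exact List.Pairwise.sortedLT ((PySem.List.pairwise_lt_pyRange_one 0 1440).filter _)
  · exact List.Pairwise.sortedLT
      (sunion_pairwise _ _ (sortedDedup_pairwise t1) (sortedDedup_pairwise t2))
  · intro a
    rw [mem_sunion, mem_sortedDedup, mem_sortedDedup]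
    simp only [List.mem_filter, PySem.List.mem_pyRange_one, List.contains_iff_mem,
      Bool.or_eq_true]
    tauto

-- on an in-range present minute, the formatted A-emission is B's membership emission
theorem emit_eq (t1 t2 : List Int) (i : Int)
    (hin : (t1.contains i || t2.contains i) = true) (hr : 0 ≤ i ∧ i < 1440) :
    (emitA t1 t2 i).map fmtRow = hEmit (sortedDedup t1) (sortedDedup t2) i := by
  have hor : t1.contains i = true ∨ t2.contains i = true := by simpa using hin
  have hm : ∀ t : List Int, (sortedDedup t).contains i = t.contains i := by
    intro t
    rw [Bool.eq_iff_iff, List.contains_iff_mem, List.contains_iff_mem, mem_sortedDedup]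
    tauto
  simp only [hEmit, hm]
  by_cases h1 : t1.contains i = true <;> by_cases h2 : t2.contains i = true
  · simp only [emitA, h1, h2, Bool.and_self, if_true]; rfl
  · simp only [emitA, h1, h2, Bool.and_false, Bool.false_eq_true, if_false, if_true]; rfl
  · simp only [emitA, h1, h2, Bool.false_and, Bool.false_eq_true, if_false]; rfl
  · rcases hor with h | h
    · exact absurd h h1
    · exact absurd h h2

-- the whole scan phase of A, formatted, equals B's merge
theorem scan_eq (t1 t2 : List Int) :
    ((PySem.List.pyRange 0 1440 1).foldl (fun acc i =>
        if t1.contains i && t2.contains i then acc ++ [[2, i - 1], [1, i]]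
        else if t1.contains i then acc ++ [[1, i]]
        else if t2.contains i then acc ++ [[2, i]]
        else acc) []).map fmtRow
    = mergeOut (sortedDedup t1) (sortedDedup t2) := by
  have hfa : (fun (acc : List (List Int)) (i : Int) =>
        if t1.contains i && t2.contains i then acc ++ [[2, i - 1], [1, i]]
        else if t1.contains i then acc ++ [[1, i]]
        else if t2.contains i then acc ++ [[2, i]]
        else acc) = fun acc i => acc ++ emitA t1 t2 i := by
    funext acc i
    simp only [emitA]; split_ifs <;> simp
  rw [hfa, PySem.List.foldl_append_eq_flatMap, List.nil_append, List.map_flatMap]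
  rw [flatMap_eq_flatMap_filter (PySem.List.pyRange 0 1440 1)
        (fun i => t1.contains i || t2.contains i)
        (fun i => (emitA t1 t2 i).map fmtRow)
        (by
          intro i hi
          simp only [Bool.or_eq_false_iff] at hi
          have m1 : i ∉ t1 := by simpa using hi.1
          have m2 : i ∉ t2 := by simpa using hi.2
          simp [emitA, m1, m2])]
  rw [mergeOut_eq_flatMap _ _ (sortedDedup_pairwise t1) (sortedDedup_pairwise t2),
    ← scan_lists_eq]
  apply List.flatMap_congr
  intro i hi
  simp only [List.mem_filter, PySem.List.mem_pyRange_one] at hi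
  exact emit_eq t1 t2 i hi.2 ⟨hi.1.1, hi.1.2⟩

-- ===== VERDICT (by name: the statement is the Claim_ definition above) =====
theorem nrj_spec : Claim_equal_nrj := by
  intro tab _ _
  unfold Spec_nrj nrj nrj_alt
  rw [parse_foldl tab [] []]
  simp only [List.nil_append, midpoints]
  exact scan_eq (aug (parse1 tab)) (aug (parse2 tab))
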